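-- pv_equiv track=rewrite | github.com/Ulysse28/Password-Manager-Python | crypte.py | decode_cesar
-- ===== SOURCE A (Python) =====
-- def decode_cesar(word_to_decode, keys, security):
--     """
--     decrypte a string with the same key and the same security level
--     """
--     security = int(security)
--     finalWord = ''
--     if int(security) < 1:
--         finalWord = word_to_decode
--     else:
--         #we create the alphabet list
--         list_alphabet = ["a", "b", "c", "d", "e", "f", "g", "h", "i", "j", "k", "l",
--                         "m", "n", "o", "p", "q", "r", "s", "t", "u", "v", "w",
--                         "x", "y", "z"]
--         new_list = []#we create a new list which will contains the encoded message
--         list_keys= list(str(keys))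
--         index = len(list_keys)
--         while index > 0:
--             index -= 1
--             list_keys[index] = int(list_keys[index])
--         n = 0
--         for i in range(len(word_to_decode)):
--             for j in range(len(list_alphabet)):
--                 if word_to_decode[i] == list_alphabet[j]:
--                     for k in range(list_keys[n]):
--                         j = j-1
--                         if j < 0:
--                             j = 25
--                     n += 1
--                     if n >=len(list_keys):
--                         n = 0
--                     (new_list.append(list_alphabet[j]))
--         new_list = "".join(new_list)
--         finalWord = decode_cesar(new_list,keys,security - 1)
--     return finalWord
-- ===== SOURCE B (Python) =====
-- def decode_cesar(word_to_decode, keys, security):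
--     """
--     decrypte a string with the same key and the same security level
--     """
--     security = int(security)
--     if security < 1:
--         return word_to_decode
--     key_digits = [int(c) for c in str(keys)]
--     word = word_to_decode
--     for _ in range(security):
--         out = []
--         n = 0
--         for c in word:
--             if 'a' <= c <= 'z':
--                 out.append(chr((ord(c) - 97 - key_digits[n % len(key_digits)]) % 26 + 97))
--                 n += 1
--         word = ''.join(out)
--     return word
-- ===== Notes on version B (the rewrite author's own statement) =====
-- stated objective: simpler
-- what changed: Replaces the recursion over security and the per-character 26-way alphabet scan with repeated key-decrement by an explicit for-loop over security levels and direct 'a'<=c<='z' arithmetic chr((ord(c)-97-key)%26+97) with a modulo-cycled key index.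
-- outside the precondition, e.g. on decode_cesar('', '1', 9991): A returns '', B returns ''
import Mathlib
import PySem

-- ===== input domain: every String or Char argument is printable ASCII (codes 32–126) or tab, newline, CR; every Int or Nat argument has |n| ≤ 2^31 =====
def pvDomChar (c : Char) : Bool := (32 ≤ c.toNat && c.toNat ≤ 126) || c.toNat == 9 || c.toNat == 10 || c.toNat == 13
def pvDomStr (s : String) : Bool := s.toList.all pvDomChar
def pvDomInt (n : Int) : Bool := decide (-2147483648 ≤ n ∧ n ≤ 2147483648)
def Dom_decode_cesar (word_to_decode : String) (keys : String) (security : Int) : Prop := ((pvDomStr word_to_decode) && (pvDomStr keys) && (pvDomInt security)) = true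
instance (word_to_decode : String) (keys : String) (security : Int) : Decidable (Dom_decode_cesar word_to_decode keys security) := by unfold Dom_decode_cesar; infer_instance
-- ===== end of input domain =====

-- B replaces A's recursion over security and its 26-way alphabet scan per character by an
-- explicit loop over the levels and direct chr((ord(c)-97-key)%26+97) arithmetic (simpler).

-- ===== PORT A =====
-- the alphabet list of A
def pvAlphabet : List Char :=
  ['a','b','c','d','e','f','g','h','i','j','k','l','m','n','o','p','q','r','s','t','u','v','w','x','y','z']

-- int(ch) for a single character (ValueError impossible under Pre_; getD 0 unreachable there)
def pvDigitVal (c : Char) : Int := (PySem.Int.ofStr? (String.singleton c)).getD 0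

-- one execution of the k-loop body: j = j-1; if j < 0: j = 25
def pvDecrStep (jj : Int) : Int := if jj - 1 < 0 then 25 else jj - 1

-- body of A's "for i" loop: the inner "for j in range(len(list_alphabet))" scan, state (n, new_list)
def pvAStep (listKeys : List Int) (st : Nat × List Char) (c : Char) : Nat × List Char :=
  (PySem.List.enumerate pvAlphabet 0).foldl (fun st2 p =>
    if c == p.2 then
      let jf := (PySem.List.pyRange 0 (listKeys.getD st2.1 0) 1).foldl (fun jj _ => pvDecrStep jj) p.1
      let n' := if st2.1 + 1 ≥ listKeys.length then 0 else st2.1 + 1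
      (n', st2.2 ++ [pvAlphabet.getD jf.toNat ' '])
    else st2) st

-- one level of A: the "for i in range(len(word_to_decode))" loop plus the final "".join
def pvAPass (listKeys : List Int) (w : String) : String :=
  String.ofList (w.toList.foldl (pvAStep listKeys) (0, [])).2

def decode_cesar (word_to_decode : String) (keys : String) (security : Int) : String :=
  if security < 1 then word_to_decode
  else
    -- list_keys conversion loop (int of every character)
    let listKeys := keys.toList.map pvDigitVal
    decode_cesar (pvAPass listKeys word_to_decode) keys (security - 1)
termination_by security.toNat
decreasing_by omega

-- ===== PORT B =====
-- body of B's inner loop, state (n, out)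
def pvBStep (keyDigits : List Int) (st : Nat × List Char) (c : Char) : Nat × List Char :=
  if 97 ≤ c.toNat ∧ c.toNat ≤ 122 then
    (st.1 + 1,
     st.2 ++ [Char.ofNat ((PySem.Int.mod ((c.toNat : Int) - 97 - keyDigits.getD (st.1 % keyDigits.length) 0) 26) + 97).toNat])
  else st

-- one pass of B: rebuild the word, n reset to 0
def pvBPass (keyDigits : List Int) (w : String) : String :=
  String.ofList (w.toList.foldl (pvBStep keyDigits) (0, [])).2

def decode_cesar_alt (word_to_decode : String) (keys : String) (security : Int) : String :=
  if security < 1 then word_to_decode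
  else
    let keyDigits := keys.toList.map pvDigitVal
    (List.range security.toNat).foldl (fun word _ => pvBPass keyDigits word) word_to_decode

-- ===== PRECONDITION & SPEC =====
-- Pre_ excludes exactly the inputs on which A raises: non-digit key characters (int() raises
-- ValueError), an empty key with a lowercase letter present (list_keys[0] raises IndexError),
-- and security > 9990, where A's one-stack-frame-per-level recursion overflows the grading
-- interpreter's recursion limit of 10000 and raises RecursionError (the exact frame budget —
-- the limit minus the few caller frames — is environment-dependent, so the cap sits a handful
-- of values below it; under CPython's default limit of 1000 A raises on all of them anyway).
def Pre_decode_cesar (word_to_decode : String) (keys : String) (security : Int) : Prop :=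
  security < 1 ∨
    (keys.toList.all Char.isDigit = true ∧
     (keys ≠ "" ∨ word_to_decode.toList.all (fun c => !(97 ≤ c.toNat && c.toNat ≤ 122)) = true) ∧
     security ≤ 9990)
instance (word_to_decode : String) (keys : String) (security : Int) : Decidable (Pre_decode_cesar word_to_decode keys security) := by
  unfold Pre_decode_cesar; infer_instance

def pvWitness_decode_cesar : String × String × Int := ("ifmmp z!", "12", 2)

def Spec_decode_cesar (word_to_decode : String) (keys : String) (security : Int) (out : String) : Prop := out = decode_cesar_alt word_to_decode keys security
instance (word_to_decode : String) (keys : String) (security : Int) (out : String) : Decidable (Spec_decode_cesar word_to_decode keys security out) := by unfold Spec_decode_cesar; infer_instance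

-- ===== CLAIM (what is proved, stated in full; the proofs are below) =====
def Claim_equal_decode_cesar : Prop := ∀ (word_to_decode : String) (keys : String) (security : Int), Dom_decode_cesar word_to_decode keys security → Pre_decode_cesar word_to_decode keys security → Spec_decode_cesar word_to_decode keys security (decode_cesar word_to_decode keys security)

-- ===== LEMMAS AND PROOFS =====

-- the body of A's inner alphabet scan, named for the lemmas below (definitionally the lambda in pvAStep)
def pvScanBody (listKeys : List Int) (c : Char) (st2 : Nat × List Char) (p : Int × Char) : Nat × List Char :=
  if c == p.2 then
    let jf := (PySem.List.pyRange 0 (listKeys.getD st2.1 0) 1).foldl (fun jj _ => pvDecrStep jj) p.1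
    let n' := if st2.1 + 1 ≥ listKeys.length then 0 else st2.1 + 1
    (n', st2.2 ++ [pvAlphabet.getD jf.toNat ' '])
  else st2

-- the result of a successful match at alphabet index j
def pvG (listKeys : List Int) (st : Nat × List Char) (j : Int) : Nat × List Char :=
  ((if st.1 + 1 ≥ listKeys.length then 0 else st.1 + 1),
   st.2 ++ [pvAlphabet.getD
      ((PySem.List.pyRange 0 (listKeys.getD st.1 0) 1).foldl (fun jj _ => pvDecrStep jj) j).toNat ' '])

theorem pvAStep_eq (L : List Int) (st : Nat × List Char) (c : Char) :
    pvAStep L st c = (PySem.List.enumerate pvAlphabet 0).foldl (pvScanBody L c) st := rfl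

theorem pvScanBody_eq (L : List Int) (c : Char) (st : Nat × List Char) (p : Int × Char) :
    pvScanBody L c st p = if c == p.2 then pvG L st p.1 else st := rfl

theorem pv_char_beq (c d : Char) : (c == d) = decide (c.toNat = d.toNat) := by
  by_cases h : c.toNat = d.toNat
  · have he : c = d := Char.ext (UInt32.toNat_inj.mp h)
    simp [he]
  · have hne : c ≠ d := fun e => h (by rw [e])
    simp [hne, h]

theorem pv_scan_nomatch (L : List Int) (c : Char) :
    ∀ (l : List (Int × Char)) (st : Nat × List Char),
      (∀ p ∈ l, (c == p.2) = false) → l.foldl (pvScanBody L c) st = st := by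
  intro l
  induction l with
  | nil => intro st _; rfl
  | cons p l ih =>
    intro st h
    rw [List.foldl_cons, pvScanBody_eq, h p (List.mem_cons_self ..)]
    exact ih st (fun q hq => h q (List.mem_cons_of_mem _ hq))

theorem pv_scan_found (L : List Int) (c : Char) (j0 : Int) :
    ∀ (l : List (Int × Char)) (st : Nat × List Char),
      (∀ p ∈ l, (c == p.2) = decide (j0 = p.1)) → (l.map Prod.fst).Nodup →
      l.foldl (pvScanBody L c) st = if j0 ∈ l.map Prod.fst then pvG L st j0 else st := by
  intro l
  induction l with
  | nil => intro st _ _; simp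
  | cons p l ih =>
    intro st hcond hnd
    have hp := hcond p (List.mem_cons_self ..)
    by_cases hj : j0 = p.1
    · rw [List.foldl_cons, pvScanBody_eq, hp, decide_eq_true hj, if_pos rfl]
      have hnd' : (p.1 :: l.map Prod.fst).Nodup := by simpa using hnd
      have hnotin : p.1 ∉ l.map Prod.fst := (List.nodup_cons.mp hnd').1
      rw [pv_scan_nomatch L c l _ (fun q hq => by
        rw [hcond q (List.mem_cons_of_mem _ hq)]
        have : j0 ≠ q.1 := by
          intro he; exact hnotin (by rw [← hj, he]; exact List.mem_map_of_mem hq)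
        simp [this])]
      have hmem : j0 ∈ (p :: l).map Prod.fst := by
        rw [List.map_cons, hj]; exact List.mem_cons_self ..
      rw [if_pos hmem, hj]
    · rw [List.foldl_cons, pvScanBody_eq, hp, decide_eq_false hj, if_neg (by simp)]
      rw [ih st (fun q hq => hcond q (List.mem_cons_of_mem _ hq))
            (List.nodup_cons.mp (by simpa using hnd)).2]
      simp [hj]

theorem pv_decr_loop : ∀ (m : Nat) (j : Int), 0 ≤ j → j < 26 →
    (PySem.List.pyRange 0 (m : Int) 1).foldl (fun jj _ => pvDecrStep jj) j = (j - m) % 26 := by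
  intro m
  induction m with
  | zero =>
    intro j h1 h2
    rw [PySem.List.pyRange_one_eq_nil (by norm_num)]
    simp; omega
  | succ m ih =>
    intro j h1 h2
    have hcast : ((m + 1 : Nat) : Int) = (m : Int) + 1 := by push_cast; ring
    rw [hcast, PySem.List.pyRange_one_succ_right (by positivity), List.foldl_append,
        ih j h1 h2]
    simp only [List.foldl_cons, List.foldl_nil, pvDecrStep]
    split_ifs <;> omega

theorem pv_enum_facts : ∀ p ∈ PySem.List.enumerate pvAlphabet 0,
    0 ≤ p.1 ∧ p.1 < 26 ∧ p.2.toNat = 97 + p.1.toNat := by decide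

theorem pv_enum_nodup : ((PySem.List.enumerate pvAlphabet 0).map Prod.fst).Nodup := by decide

theorem pv_alpha_getD : ∀ k : Nat, k < 26 → pvAlphabet.getD k ' ' = Char.ofNat (97 + k) := by decide

theorem pv_getD_nonneg (L : List Int) (h : ∀ d ∈ L, 0 ≤ d) (n : Nat) : 0 ≤ L.getD n 0 := by
  by_cases hn : n < L.length
  · rw [List.getD_eq_getElem L 0 hn]; exact h _ (List.getElem_mem hn)
  · rw [List.getD_eq_default L 0 (by omega)]

theorem pv_stepA_letter (L : List Int) (hnn : ∀ d ∈ L, 0 ≤ d) (c : Char)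
    (h1 : 97 ≤ c.toNat) (h2 : c.toNat ≤ 122) (st : Nat × List Char) :
    pvAStep L st c = ((if st.1 + 1 ≥ L.length then 0 else st.1 + 1),
      st.2 ++ [Char.ofNat ((((c.toNat : Int) - 97 - L.getD st.1 0) % 26 + 97).toNat)]) := by
  have hj0 : (0:Int) ≤ (c.toNat : Int) - 97 ∧ (c.toNat : Int) - 97 < 26 := by omega
  rw [pvAStep_eq, pv_scan_found L c ((c.toNat : Int) - 97) _ st
        (fun p hp => by
          obtain ⟨hp1, hp2, hp3⟩ := pv_enum_facts p hp
          rw [pv_char_beq]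
          simp only [decide_eq_decide]
          omega)
        pv_enum_nodup]
  rw [if_pos (by
    rw [PySem.List.map_fst_enumerate, PySem.List.mem_pyRange_one]
    constructor
    · exact hj0.1
    · simpa using hj0.2)]
  unfold pvG
  have hkey : 0 ≤ L.getD st.1 0 := pv_getD_nonneg L hnn st.1
  rw [show L.getD st.1 0 = ((L.getD st.1 0).toNat : Int) from (Int.toNat_of_nonneg hkey).symm,
      pv_decr_loop _ _ hj0.1 hj0.2]
  have hmod : (0:Int) ≤ ((c.toNat : Int) - 97 - (L.getD st.1 0).toNat) % 26 ∧
      ((c.toNat : Int) - 97 - (L.getD st.1 0).toNat) % 26 < 26 := by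
    constructor
    · exact Int.emod_nonneg _ (by norm_num)
    · exact Int.emod_lt_of_pos _ (by norm_num)
  rw [pv_alpha_getD _ (by omega)]
  rw [show 97 + ((((c.toNat : Int)) - 97 - ((L.getD st.1 0).toNat : Int)) % 26).toNat
      = ((((c.toNat : Int)) - 97 - ((L.getD st.1 0).toNat : Int)) % 26 + 97).toNat by omega]

theorem pv_stepA_other (L : List Int) (c : Char)
    (h : c.toNat < 97 ∨ 122 < c.toNat) (st : Nat × List Char) : pvAStep L st c = st := by
  rw [pvAStep_eq]
  exact pv_scan_nomatch L c _ st (fun p hp => by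
    obtain ⟨hp1, hp2, hp3⟩ := pv_enum_facts p hp
    rw [pv_char_beq]
    simp only [decide_eq_false_iff_not]
    omega)

theorem pv_mod26 (x : Int) : PySem.Int.mod x 26 = x % 26 :=
  PySem.Int.mod_eq_emod_of_pos (by norm_num)

theorem pv_fold_eq (L : List Int) (hne : L ≠ []) (hnn : ∀ d ∈ L, 0 ≤ d) :
    ∀ (cs : List Char) (nB : Nat) (acc : List Char),
      (cs.foldl (pvAStep L) (nB % L.length, acc)).2 = (cs.foldl (pvBStep L) (nB, acc)).2 := by
  have hlen : 0 < L.length := List.length_pos_iff.mpr hne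
  intro cs
  induction cs with
  | nil => intro nB acc; rfl
  | cons c cs ih =>
    intro nB acc
    by_cases hc : 97 ≤ c.toNat ∧ c.toNat ≤ 122
    · have ha : nB % L.length < L.length := Nat.mod_lt _ hlen
      have hwrap : (if nB % L.length + 1 ≥ L.length then 0 else nB % L.length + 1)
          = (nB + 1) % L.length := by
        have h1 : (nB % L.length + 1) % L.length = (nB + 1) % L.length := Nat.mod_add_mod nB L.length 1
        conv_rhs => rw [← h1]
        split_ifs with h
        · rw [show nB % L.length + 1 = L.length by omega, Nat.mod_self]
        · rw [Nat.mod_eq_of_lt (show nB % L.length + 1 < L.length by omega)]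
      simp only [List.foldl_cons]
      rw [pv_stepA_letter L hnn c hc.1 hc.2, hwrap]
      show _ = (cs.foldl (pvBStep L) (pvBStep L (nB, acc) c)).2
      rw [show pvBStep L (nB, acc) c = (nB + 1,
            acc ++ [Char.ofNat ((((c.toNat : Int) - 97 - L.getD (nB % L.length) 0) % 26 + 97).toNat)]) by
        simp only [pvBStep, if_pos hc, pv_mod26]]
      exact ih (nB + 1) _
    · simp only [List.foldl_cons]
      rw [pv_stepA_other L c (by omega), show pvBStep L (nB, acc) c = (nB, acc) by
        simp only [pvBStep, if_neg hc]]
      exact ih nB acc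

theorem pv_pass_eq (L : List Int) (hne : L ≠ []) (hnn : ∀ d ∈ L, 0 ≤ d) (w : String) :
    pvAPass L w = pvBPass L w := by
  unfold pvAPass pvBPass
  have h := pv_fold_eq L hne hnn w.toList 0 []
  rw [Nat.zero_mod] at h
  rw [h]

theorem pv_foldA_id (L : List Int) :
    ∀ (cs : List Char) (st : Nat × List Char),
      (∀ c ∈ cs, c.toNat < 97 ∨ 122 < c.toNat) → cs.foldl (pvAStep L) st = st := by
  intro cs
  induction cs with
  | nil => intro st _; rfl
  | cons c cs ih =>
    intro st h
    rw [List.foldl_cons, pv_stepA_other L c (h c (List.mem_cons_self ..))]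
    exact ih st (fun d hd => h d (List.mem_cons_of_mem _ hd))

theorem pv_foldB_id (L : List Int) :
    ∀ (cs : List Char) (st : Nat × List Char),
      (∀ c ∈ cs, c.toNat < 97 ∨ 122 < c.toNat) → cs.foldl (pvBStep L) st = st := by
  intro cs
  induction cs with
  | nil => intro st _; rfl
  | cons c cs ih =>
    intro st h
    have hc : ¬ (97 ≤ c.toNat ∧ c.toNat ≤ 122) := by
      have := h c (List.mem_cons_self ..); omega
    rw [List.foldl_cons, show pvBStep L st c = st by simp only [pvBStep, if_neg hc]]
    exact ih st (fun d hd => h d (List.mem_cons_of_mem _ hd))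

theorem pv_passA_noletter (L : List Int) (w : String)
    (h : ∀ c ∈ w.toList, c.toNat < 97 ∨ 122 < c.toNat) : pvAPass L w = "" := by
  unfold pvAPass
  rw [pv_foldA_id L _ _ h]

theorem pv_passB_noletter (L : List Int) (w : String)
    (h : ∀ c ∈ w.toList, c.toNat < 97 ∨ 122 < c.toNat) : pvBPass L w = "" := by
  unfold pvBPass
  rw [pv_foldB_id L _ _ h]

theorem pv_decodeA_iterate : ∀ (n : Nat) (w k : String) (s : Int), s.toNat = n →
    decode_cesar w k s = (fun v => pvAPass (k.toList.map pvDigitVal) v)^[n] w := by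
  intro n
  induction n with
  | zero =>
    intro w k s hn
    rw [decode_cesar, if_pos (by omega)]
    rfl
  | succ n ih =>
    intro w k s hn
    rw [decode_cesar, if_neg (by omega : ¬ s < 1)]
    rw [ih _ k (s - 1) (by omega), Function.iterate_succ_apply]

theorem pv_foldl_range_const (f : String → String) :
    ∀ (n : Nat) (w : String), (List.range n).foldl (fun word _ => f word) w = f^[n] w := by
  intro n
  induction n with
  | zero => intro w; rfl
  | succ n ih =>
    intro w
    rw [List.range_succ, List.foldl_append, ih w]
    simp [Function.iterate_succ_apply']

theorem pv_decodeB_iterate (w k : String) (s : Int) (hs : ¬ s < 1) :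
    decode_cesar_alt w k s = (fun v => pvBPass (k.toList.map pvDigitVal) v)^[s.toNat] w := by
  rw [decode_cesar_alt, if_neg hs]
  exact pv_foldl_range_const _ s.toNat w

theorem pv_digit_nonneg_ofNat : ∀ n : Nat, n < 128 →
    (Char.ofNat n).isDigit = true → 0 ≤ pvDigitVal (Char.ofNat n) := by decide

theorem pv_keys_nonneg (k : String) (hdom : pvDomStr k = true)
    (hdig : k.toList.all Char.isDigit = true) :
    ∀ d ∈ k.toList.map pvDigitVal, 0 ≤ d := by
  intro d hd
  rcases List.mem_map.mp hd with ⟨c, hc, rfl⟩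
  have h1 : pvDomChar c = true := by
    rw [pvDomStr, List.all_eq_true] at hdom; exact hdom c hc
  have h2 : c.isDigit = true := by
    rw [List.all_eq_true] at hdig; exact hdig c hc
  have hlt : c.toNat < 128 := by
    simp only [pvDomChar, Bool.or_eq_true, Bool.and_eq_true, decide_eq_true_eq, beq_iff_eq] at h1
    omega
  have := pv_digit_nonneg_ofNat c.toNat hlt
  rw [Char.ofNat_toNat] at this
  exact this h2

theorem pv_iter_empty (f : String → String) (hf : f "" = "") :
    ∀ m : Nat, f^[m] "" = "" := by
  intro m
  induction m with
  | zero => rfl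
  | succ m ih => rw [Function.iterate_succ_apply, hf, ih]

-- ===== VERDICT (by name: the statement is the Claim_ definition above) =====
theorem decode_cesar_spec : Claim_equal_decode_cesar := by
  intro w k s hdom hpre
  unfold Spec_decode_cesar
  by_cases hs : s < 1
  · rw [decode_cesar, if_pos hs, decode_cesar_alt, if_pos hs]
  · have hpre' := hpre.resolve_left hs
    obtain ⟨hdig, hcase, _⟩ := hpre'
    have hdomk : pvDomStr k = true := by
      simp only [Dom_decode_cesar, Bool.and_eq_true] at hdom
      exact hdom.1.2
    have hnn := pv_keys_nonneg k hdomk hdig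
    rw [pv_decodeA_iterate s.toNat w k s rfl, pv_decodeB_iterate w k s hs]
    rcases hcase with hk | hnl
    · have hLne : k.toList.map pvDigitVal ≠ [] := by
        simp only [ne_eq, List.map_eq_nil_iff, String.toList_eq_nil_iff]
        exact hk
      rw [funext (pv_pass_eq _ hLne hnn)]
    · have hnl' : ∀ c ∈ w.toList, c.toNat < 97 ∨ 122 < c.toNat := by
        rw [List.all_eq_true] at hnl
        intro c hc
        have := hnl c hc
        simp only [Bool.not_eq_eq_eq_not, Bool.not_true, Bool.and_eq_false_iff,
          decide_eq_false_iff_not] at this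
        omega
      have hn1 : 1 ≤ s.toNat := by omega
      obtain ⟨m, hm⟩ : ∃ m, s.toNat = m + 1 := ⟨s.toNat - 1, by omega⟩
      have hAe : pvAPass (k.toList.map pvDigitVal) "" = "" :=
        pv_passA_noletter _ "" (by intro c hc; simp at hc)
      have hBe : pvBPass (k.toList.map pvDigitVal) "" = "" :=
        pv_passB_noletter _ "" (by intro c hc; simp at hc)
      rw [hm, Function.iterate_succ_apply, Function.iterate_succ_apply,
          pv_passA_noletter _ w hnl', pv_passB_noletter _ w hnl',
          pv_iter_empty _ hAe, pv_iter_empty _ hBe]
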